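-- pv_equiv track=rewrite | github.com/ArchonMegalon/executive-assistant | scripts/chummer6_magixai_api.py | magixai_image_model_candidates
-- ===== SOURCE A (Python) =====
-- MAGIXAI_DEFAULT_IMAGE_MODELS = (
--     "fal-ai/flux-2-pro",
--     "fal-ai/flux-pro/v1.1-ultra",
--     "fal-ai/hidream-i1-dev",
--     "fal-ai/ideogram/v2",
--     "fal-ai/gpt-image-1.5",
--     "fal-ai/flux-2",
--     "fal-ai/flux/dev",
--     "fal-ai/hidream-i1-fast",
-- )
--
-- MAGIXAI_IMAGE_MODEL_ALIASES = {
--     "flux": "fal-ai/flux/dev",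
--     "flux-dev": "fal-ai/flux/dev",
--     "flux-2": "fal-ai/flux-2",
--     "ideogram": "fal-ai/ideogram/v2",
-- }
--
-- def magixai_image_model_candidates(configured_model: str | None = None) -> list[str]:
--     candidates: list[str] = []
--     for candidate in (configured_model, *MAGIXAI_DEFAULT_IMAGE_MODELS):
--         normalized = str(candidate or "").strip()
--         if not normalized:
--             continue
--         normalized = MAGIXAI_IMAGE_MODEL_ALIASES.get(normalized.lower(), normalized)
--         if normalized not in candidates:
--             candidates.append(normalized)
--     return candidates
-- ===== SOURCE B (Python) =====
-- MAGIXAI_DEFAULT_IMAGE_MODELS = (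
--     "fal-ai/flux-2-pro",
--     "fal-ai/flux-pro/v1.1-ultra",
--     "fal-ai/hidream-i1-dev",
--     "fal-ai/ideogram/v2",
--     "fal-ai/gpt-image-1.5",
--     "fal-ai/flux-2",
--     "fal-ai/flux/dev",
--     "fal-ai/hidream-i1-fast",
-- )
--
-- MAGIXAI_IMAGE_MODEL_ALIASES = {
--     "flux": "fal-ai/flux/dev",
--     "flux-dev": "fal-ai/flux/dev",
--     "flux-2": "fal-ai/flux-2",
--     "ideogram": "fal-ai/ideogram/v2",
-- }
--
-- # Computed once at import: the defaults are literals (already stripped, nonempty,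
-- # pairwise distinct after alias resolution), so no per-call dedup is needed.
-- MAGIXAI_RESOLVED_DEFAULTS = [
--     MAGIXAI_IMAGE_MODEL_ALIASES.get(m.lower(), m) for m in MAGIXAI_DEFAULT_IMAGE_MODELS
-- ]
--
-- def magixai_image_model_candidates(configured_model: str | None = None) -> list[str]:
--     head = str(configured_model or "").strip()
--     if not head:
--         return list(MAGIXAI_RESOLVED_DEFAULTS)
--     head = MAGIXAI_IMAGE_MODEL_ALIASES.get(head.lower(), head)
--     return [head] + [d for d in MAGIXAI_RESOLVED_DEFAULTS if d != head]
-- ===== Notes on version B (the rewrite author's own statement) =====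
-- stated objective: alternative
-- what changed: Per-call dedup is eliminated: the alias-resolved defaults are precomputed once as a module constant (they are already stripped, nonempty and pairwise distinct), so each call only normalizes the configured model, prepends it, and filters it out of the constant tail.
import Mathlib
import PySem

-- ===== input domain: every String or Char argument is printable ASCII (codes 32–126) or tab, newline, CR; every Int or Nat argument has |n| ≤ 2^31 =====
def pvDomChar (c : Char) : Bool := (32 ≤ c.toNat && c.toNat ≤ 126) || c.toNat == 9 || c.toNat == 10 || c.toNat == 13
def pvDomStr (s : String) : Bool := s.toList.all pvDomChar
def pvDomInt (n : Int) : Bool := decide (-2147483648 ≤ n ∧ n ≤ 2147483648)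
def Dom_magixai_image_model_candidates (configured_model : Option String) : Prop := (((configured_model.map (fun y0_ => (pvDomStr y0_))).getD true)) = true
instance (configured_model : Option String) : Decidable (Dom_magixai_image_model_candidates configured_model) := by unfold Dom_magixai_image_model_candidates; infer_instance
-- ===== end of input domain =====

-- B drops the per-call dedup loop: the alias-resolved defaults are a precomputed module
-- constant (already stripped, nonempty, pairwise distinct), so a call only normalizes the
-- configured model, prepends it, and filters it out of that constant tail (objective: alternative).

-- module constants shared by both implementations
def MAGIXAI_DEFAULT_IMAGE_MODELS : List String :=
  [ "fal-ai/flux-2-pro"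
  , "fal-ai/flux-pro/v1.1-ultra"
  , "fal-ai/hidream-i1-dev"
  , "fal-ai/ideogram/v2"
  , "fal-ai/gpt-image-1.5"
  , "fal-ai/flux-2"
  , "fal-ai/flux/dev"
  , "fal-ai/hidream-i1-fast" ]

def MAGIXAI_IMAGE_MODEL_ALIASES : PySem.Dict String String :=
  PySem.Dict.ofList
  [ ("flux", "fal-ai/flux/dev")
  , ("flux-dev", "fal-ai/flux/dev")
  , ("flux-2", "fal-ai/flux-2")
  , ("ideogram", "fal-ai/ideogram/v2") ]

-- ===== PORT A =====
-- `(configured_model, *MAGIXAI_DEFAULT_IMAGE_MODELS)`; `str(c or "")` is `.getD ""` on this domain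
-- (a falsy string is exactly "", and `"" or ""` is "").
def magixai_image_model_candidates (configured_model : Option String) : List String :=
  (configured_model :: MAGIXAI_DEFAULT_IMAGE_MODELS.map some).foldl
    (fun candidates candidate =>
      let normalized := PySem.Str.strip (candidate.getD "")
      if normalized = "" then candidates
      else
        let normalized := MAGIXAI_IMAGE_MODEL_ALIASES.getD (PySem.Str.lower normalized) normalized
        if candidates.contains normalized then candidates
        else candidates ++ [normalized])
    []

-- ===== PORT B =====
-- module-level constant of Source B, computed once
def MAGIXAI_RESOLVED_DEFAULTS : List String :=
  MAGIXAI_DEFAULT_IMAGE_MODELS.map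
    (fun m => MAGIXAI_IMAGE_MODEL_ALIASES.getD (PySem.Str.lower m) m)

def magixai_image_model_candidates_alt (configured_model : Option String) : List String :=
  let head := PySem.Str.strip (configured_model.getD "")
  if head = "" then MAGIXAI_RESOLVED_DEFAULTS
  else
    let head := MAGIXAI_IMAGE_MODEL_ALIASES.getD (PySem.Str.lower head) head
    head :: MAGIXAI_RESOLVED_DEFAULTS.filter (fun d => ¬ d = head)

-- ===== PRECONDITION & SPEC =====
def Spec_magixai_image_model_candidates (configured_model : Option String) (out : List String) : Prop := out = magixai_image_model_candidates_alt configured_model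
instance (configured_model : Option String) (out : List String) : Decidable (Spec_magixai_image_model_candidates configured_model out) := by unfold Spec_magixai_image_model_candidates; infer_instance

-- ===== CLAIM (what is proved, stated in full; the proofs are below) =====
def Claim_equal_magixai_image_model_candidates : Prop := ∀ (configured_model : Option String), Dom_magixai_image_model_candidates configured_model → Spec_magixai_image_model_candidates configured_model (magixai_image_model_candidates configured_model)

-- ===== LEMMAS AND PROOFS =====

-- A's loop over a Nodup tail of defaults, each a fixed point of strip and alias resolution
-- and nonempty, appends exactly the ones not already in the accumulator.
theorem magixai_fold_defaults (ds : List String) (acc : List String)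
    (hnd : ds.Nodup)
    (hfix : ∀ d ∈ ds, PySem.Str.strip d = d ∧
        MAGIXAI_IMAGE_MODEL_ALIASES.getD (PySem.Str.lower d) d = d ∧ d ≠ "") :
    (ds.map some).foldl
      (fun candidates candidate =>
        let normalized := PySem.Str.strip (candidate.getD "")
        if normalized = "" then candidates
        else
          let normalized := MAGIXAI_IMAGE_MODEL_ALIASES.getD (PySem.Str.lower normalized) normalized
          if candidates.contains normalized then candidates
          else candidates ++ [normalized])
      acc
    = acc ++ ds.filter (fun d => ¬ acc.contains d) := by
  induction ds generalizing acc with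
  | nil => simp
  | cons d ds ih =>
    obtain ⟨hs, ha, hne⟩ := hfix d (by simp)
    have hnd' : ds.Nodup := hnd.of_cons
    have hd_notmem : d ∉ ds := by simpa using (List.nodup_cons.mp hnd).1
    rw [List.map_cons, List.foldl_cons]
    have hstep : (let normalized := PySem.Str.strip ((some d).getD "")
        if normalized = "" then acc
        else
          let normalized := MAGIXAI_IMAGE_MODEL_ALIASES.getD (PySem.Str.lower normalized) normalized
          if acc.contains normalized then acc else acc ++ [normalized])
        = if acc.contains d then acc else acc ++ [d] := by
      simp only [Option.getD_some, hs, ha]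
      rw [if_neg hne]
    rw [hstep, List.filter_cons]
    by_cases hc : acc.contains d
    · rw [if_pos hc, ih acc hnd' (fun x hx => hfix x (by simp [hx]))]
      have hm : d ∈ acc := by simpa using hc
      simp [hm]
    · rw [if_neg (by simpa using hc),
        ih (acc ++ [d]) hnd' (fun x hx => hfix x (by simp [hx]))]
      have hfil : ds.filter (fun x => ¬ (acc ++ [d]).contains x)
          = ds.filter (fun x => ¬ acc.contains x) := by
        apply List.filter_congr
        intro x hx
        have hxd : x ≠ d := fun h => hd_notmem (h ▸ hx)
        simp [hxd]
      rw [hfil]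
      have hm : d ∉ acc := by simpa using hc
      simp [hm]

-- the concrete defaults satisfy the lemma's hypotheses
theorem magixai_defaults_nodup : MAGIXAI_DEFAULT_IMAGE_MODELS.Nodup := by decide

theorem magixai_defaults_fix : ∀ d ∈ MAGIXAI_DEFAULT_IMAGE_MODELS,
    PySem.Str.strip d = d ∧
      MAGIXAI_IMAGE_MODEL_ALIASES.getD (PySem.Str.lower d) d = d ∧ d ≠ "" := by decide

theorem magixai_resolved_eq : MAGIXAI_RESOLVED_DEFAULTS = MAGIXAI_DEFAULT_IMAGE_MODELS := by decide

theorem magixai_image_model_candidates_spec' (configured_model : Option String) :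
    magixai_image_model_candidates configured_model
      = magixai_image_model_candidates_alt configured_model := by
  unfold magixai_image_model_candidates magixai_image_model_candidates_alt
  rw [List.foldl_cons]
  by_cases h : PySem.Str.strip (configured_model.getD "") = ""
  · simp only [h, List.contains_nil, Bool.false_eq_true, if_false,
      List.nil_append]
    rw [magixai_fold_defaults _ _ magixai_defaults_nodup magixai_defaults_fix,
      magixai_resolved_eq]
    simp
  · simp only [if_neg h, List.contains_nil, Bool.false_eq_true, if_false,
      List.nil_append]
    rw [magixai_fold_defaults _ _ magixai_defaults_nodup magixai_defaults_fix]
    rw [magixai_resolved_eq]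
    refine congrArg (List.cons _) (List.filter_congr ?_)
    intro x hx
    simp [eq_comm]

-- ===== VERDICT (by name: the statement is the Claim_ definition above) =====
theorem magixai_image_model_candidates_spec : Claim_equal_magixai_image_model_candidates := by
  intro cm _
  exact magixai_image_model_candidates_spec' cm
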